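-- pv_equiv track=rewrite | github.com/mluisa/AdventOfCode | aoc_2023/day_2.py | _is_cube_sets_possibles
-- ===== SOURCE A (Python) =====
-- RED = "red"
--
-- GREEN = "green"
--
-- BLUE = "blue"
--
-- MAX_CUBES_NUMBER_BY_COLOR = {
--     RED: 12,
--     GREEN: 13,
--     BLUE: 14
-- }
--
-- def _is_cube_sets_possibles(cube_sets):
--     is_possible = True
--
--     for cube_set in cube_sets:
--         for cubes in cube_set.split(","):
--             if RED in cubes:
--                 red_cubes = _get_number_in_string(cubes)
--                 if red_cubes > MAX_CUBES_NUMBER_BY_COLOR[RED]: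
--                     is_possible = False
--             elif GREEN in cubes:
--                 green_cubes = _get_number_in_string(cubes)
--                 if green_cubes > MAX_CUBES_NUMBER_BY_COLOR[GREEN]:
--                     is_possible = False
--             elif BLUE in cubes:
--                 blue_cubes = _get_number_in_string(cubes)
--                 if blue_cubes > MAX_CUBES_NUMBER_BY_COLOR[BLUE]:
--                     is_possible = False
--
--     return is_possible
--
-- def _get_number_in_string(value):
--     return int("".join(list(filter(str.isdigit, value))))
-- ===== SOURCE B (Python) =====
-- RED = "red"
-- GREEN = "green"
-- BLUE = "blue"
--
-- MAX_CUBES_NUMBER_BY_COLOR = {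
--     RED: 12,
--     GREEN: 13,
--     BLUE: 14
-- }
--
-- def _color_of(token):
--     for color in (RED, GREEN, BLUE):
--         if color in token:
--             return color
--     return None
--
-- def _digits_value(token):
--     return int("".join(c for c in token if c.isdigit()))
--
-- def _is_cube_sets_possibles(cube_sets):
--     tokens = [t for cs in cube_sets for t in cs.split(",")]
--     return all(
--         max((_digits_value(t) for t in tokens if _color_of(t) == color), default=0) <= limit
--         for color, limit in MAX_CUBES_NUMBER_BY_COLOR.items()
--     )
-- ===== Notes on version B (the rewrite author's own statement) =====
-- stated objective: alternative
-- what changed: B flattens all comma-tokens once, attributes each to its first-matching color, and compares each color's maximum count against its limit in a grouped pass, instead of A's nested loops mutating a boolean possibility flag token by token; Pre_ excludes inputs where a token contains a color name but no digit, on which both A and B raise ValueError from int('').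
import Mathlib
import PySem

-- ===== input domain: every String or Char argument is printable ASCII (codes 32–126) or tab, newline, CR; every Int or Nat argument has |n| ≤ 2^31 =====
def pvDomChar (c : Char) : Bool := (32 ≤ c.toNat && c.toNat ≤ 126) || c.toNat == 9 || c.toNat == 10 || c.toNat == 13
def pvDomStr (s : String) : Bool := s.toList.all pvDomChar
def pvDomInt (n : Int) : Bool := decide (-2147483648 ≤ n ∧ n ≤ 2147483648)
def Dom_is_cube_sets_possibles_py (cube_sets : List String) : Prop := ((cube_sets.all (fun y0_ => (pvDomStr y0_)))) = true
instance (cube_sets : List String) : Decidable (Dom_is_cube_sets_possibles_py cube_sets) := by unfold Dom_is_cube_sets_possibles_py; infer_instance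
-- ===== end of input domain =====

-- B replaces A's flag-carrying nested elif scan by a grouped per-color maximum compared with each limit (objective: alternative decomposition, same return value).

-- ===== PORT A =====
-- _get_number_in_string: int("".join(filter(str.isdigit, value))) — "".join of the digit
-- characters IS the string of those characters, so int(...) is ofChars? of the filtered chars;
-- int("") raises ValueError (ofChars? = none): Pre_ excludes that, .getD 0 is never reached inside Pre_.
def get_number_in_string_py (value : String) : Int :=
  (PySem.Int.ofChars? (value.toList.filter PySem.Chars.isdigit)).getD 0

def is_cube_sets_possibles_py (cube_sets : List String) : Bool :=
  cube_sets.foldl (fun is_possible cube_set =>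
    ((PySem.Str.split? cube_set ",").getD []).foldl (fun is_possible cubes =>
      if PySem.Str.isIn "red" cubes then
        let red_cubes := get_number_in_string_py cubes
        if red_cubes > 12 then false else is_possible
      else if PySem.Str.isIn "green" cubes then
        let green_cubes := get_number_in_string_py cubes
        if green_cubes > 13 then false else is_possible
      else if PySem.Str.isIn "blue" cubes then
        let blue_cubes := get_number_in_string_py cubes
        if blue_cubes > 14 then false else is_possible
      else is_possible) is_possible) true

-- ===== PORT B =====
-- first color (elif order red, green, blue) occurring as a substring of the token, or none
def color_of_b (token : String) : Option String :=
  if PySem.Str.isIn "red" token then some "red"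
  else if PySem.Str.isIn "green" token then some "green"
  else if PySem.Str.isIn "blue" token then some "blue"
  else none

-- _digits_value: int of the digit characters of the token (same remark as for A's helper)
def digits_value_b (token : String) : Int :=
  (PySem.Int.ofChars? (token.toList.filter PySem.Chars.isdigit)).getD 0

def is_cube_sets_possibles_py_alt (cube_sets : List String) : Bool :=
  let tokens := cube_sets.flatMap (fun cs => (PySem.Str.split? cs ",").getD [])
  [("red", (12 : Int)), ("green", (13 : Int)), ("blue", (14 : Int))].all (fun p =>
    ((tokens.filter (fun t => color_of_b t == some p.1)).map digits_value_b).foldl max 0 ≤ p.2)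

-- ===== PRECONDITION & SPEC =====
-- Pre_ excludes exactly the inputs where some comma-token contains a color name but no digit:
-- there Python's int("") raises ValueError in both A and B.
def Pre_is_cube_sets_possibles_py (cube_sets : List String) : Prop :=
  ∀ s ∈ cube_sets, ∀ t ∈ (PySem.Str.split? s ",").getD [],
    (PySem.Str.isIn "red" t || PySem.Str.isIn "green" t || PySem.Str.isIn "blue" t) = true →
    (t.toList.any PySem.Chars.isdigit) = true
instance (cube_sets : List String) : Decidable (Pre_is_cube_sets_possibles_py cube_sets) := by unfold Pre_is_cube_sets_possibles_py; infer_instance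

def pvWitness_is_cube_sets_possibles_py : List String := ["1 red, 2 green", "14 blue"]

def Spec_is_cube_sets_possibles_py (cube_sets : List String) (out : Bool) : Prop := out = is_cube_sets_possibles_py_alt cube_sets
instance (cube_sets : List String) (out : Bool) : Decidable (Spec_is_cube_sets_possibles_py cube_sets out) := by unfold Spec_is_cube_sets_possibles_py; infer_instance

-- ===== CLAIM (what is proved, stated in full; the proofs are below) =====
def Claim_equal_is_cube_sets_possibles_py : Prop := ∀ (cube_sets : List String), Dom_is_cube_sets_possibles_py cube_sets → Pre_is_cube_sets_possibles_py cube_sets → Spec_is_cube_sets_possibles_py cube_sets (is_cube_sets_possibles_py cube_sets)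

-- ===== LEMMAS AND PROOFS =====

-- a token violates its (first-match) color's limit
def pvViol (t : String) : Bool :=
  if PySem.Str.isIn "red" t then decide (get_number_in_string_py t > 12)
  else if PySem.Str.isIn "green" t then decide (get_number_in_string_py t > 13)
  else if PySem.Str.isIn "blue" t then decide (get_number_in_string_py t > 14)
  else false

theorem stepA_eq (b : Bool) (t : String) :
    (if PySem.Str.isIn "red" t then
        let red_cubes := get_number_in_string_py t
        if red_cubes > 12 then false else b
      else if PySem.Str.isIn "green" t then
        let green_cubes := get_number_in_string_py t
        if green_cubes > 13 then false else b
      else if PySem.Str.isIn "blue" t then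
        let blue_cubes := get_number_in_string_py t
        if blue_cubes > 14 then false else b
      else b) = (b && !pvViol t) := by
  unfold pvViol
  split_ifs <;> simp [Bool.and_comm]

theorem foldA_eq (l : List String) (b : Bool) :
    l.foldl (fun b t => b && !pvViol t) b = (b && !(l.any pvViol)) := by
  induction l generalizing b with
  | nil => simp
  | cons h tl ih => simp [List.foldl_cons, ih, Bool.and_assoc]

theorem A_eq (cube_sets : List String) :
    is_cube_sets_possibles_py cube_sets
      = !((cube_sets.flatMap (fun cs => (PySem.Str.split? cs ",").getD [])).any pvViol) := by
  unfold is_cube_sets_possibles_py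
  have h : ∀ (b : Bool),
      cube_sets.foldl (fun is_possible cube_set =>
        ((PySem.Str.split? cube_set ",").getD []).foldl (fun b t => b && !pvViol t) is_possible) b
      = (b && !((cube_sets.flatMap (fun cs => (PySem.Str.split? cs ",").getD [])).any pvViol)) := by
    induction cube_sets with
    | nil => simp
    | cons hd tl ih =>
      intro b
      rw [List.foldl_cons, foldA_eq, ih]
      simp [Bool.and_assoc]
  simp only [stepA_eq] at h ⊢
  simpa using h true

theorem foldl_max_le (l : List Int) (a lim : Int) :
    (l.foldl max a ≤ lim) ↔ (a ≤ lim ∧ ∀ x ∈ l, x ≤ lim) := by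
  induction l generalizing a with
  | nil => simp
  | cons h tl ih =>
    simp only [List.foldl_cons, List.mem_cons, ih, max_le_iff]
    aesop

theorem viol_iff (t : String) :
    pvViol t = false ↔
      (∀ p ∈ [("red", (12 : Int)), ("green", (13 : Int)), ("blue", (14 : Int))],
        color_of_b t = some p.1 → digits_value_b t ≤ p.2) := by
  unfold pvViol color_of_b digits_value_b get_number_in_string_py
  split_ifs <;> simp

theorem is_cube_sets_possibles_py_eq_alt (cube_sets : List String) :
    is_cube_sets_possibles_py cube_sets = is_cube_sets_possibles_py_alt cube_sets := by
  rw [Bool.eq_iff_iff, A_eq]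
  unfold is_cube_sets_possibles_py_alt
  have hA : (!((cube_sets.flatMap (fun cs => (PySem.Str.split? cs ",").getD [])).any pvViol)) = true
      ↔ ∀ t ∈ cube_sets.flatMap (fun cs => (PySem.Str.split? cs ",").getD []), pvViol t = false := by
    simp only [Bool.not_eq_eq_eq_not, Bool.not_true, List.any_eq_false, List.mem_flatMap]
    constructor
    · rintro h t ⟨s, hs, hts⟩
      simpa using h t ⟨s, hs, hts⟩
    · rintro h t ⟨s, hs, hts⟩
      simpa using h t ⟨s, hs, hts⟩
  rw [hA, List.all_eq_true]
  constructor
  · intro h p hp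
    rw [decide_eq_true_eq, foldl_max_le]
    constructor
    · fin_cases hp <;> norm_num
    · rintro x hx
      rw [List.mem_map] at hx
      obtain ⟨t, htf, rfl⟩ := hx
      rw [List.mem_filter, beq_iff_eq] at htf
      exact (viol_iff t).mp (h t htf.1) p hp htf.2
  · intro h t ht
    rw [viol_iff]
    intro p hp hc
    have := (foldl_max_le _ _ _).mp ((decide_eq_true_eq).mp (h p hp))
    exact this.2 _ (List.mem_map.mpr ⟨t, List.mem_filter.mpr ⟨ht, beq_iff_eq.mpr hc⟩, rfl⟩)

-- ===== VERDICT (by name: the statement is the Claim_ definition above) =====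
theorem is_cube_sets_possibles_py_spec : Claim_equal_is_cube_sets_possibles_py := by
  intro cube_sets _ _
  unfold Spec_is_cube_sets_possibles_py
  exact is_cube_sets_possibles_py_eq_alt cube_sets
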